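-- pv_equiv track=rewrite | github.com/jay-johnson/antinex-utils | antinex_utils/make_predictions.py | build_train_and_test_features
-- ===== SOURCE A (Python) =====
-- def build_train_and_test_features(
--         df_columns,
--         features_to_process,
--         predict_feature,
--         ignore_features):
--     """build_train_and_test_features
--
--     Order matters when slicing up datasets using scalers...
--
--     if not, then something that is an int/bool can get into a float
--     column and that is really bad for making predictions
--     with new or pre-trained models...
--
--     :param df_columns: columns in the dataframe
--     :param features_to_process: requested features to train
--     :param predict_feature: requested feature to predict
--     :param ignore_features: requested non-numeric/not-wanted features
--     """
--     train_and_test_features = []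
--
--     # for all columns in the data
--     # add columns in order if they are in the requested:
--     # features_to_process list and not in the ignore_features
--     for c in df_columns:
--         if c == predict_feature:
--             train_and_test_features.append(
--                 c)
--         else:
--             add_feature = True
--             for i in ignore_features:
--                 if i == c:
--                     add_feature = False
--                     break
--             if add_feature:
--                 for f in features_to_process:
--                     if f == c:
--                         train_and_test_features.append(
--                             c)
--                         break
--     # end of filtering features before scalers
--
--     return train_and_test_features
-- ===== SOURCE B (Python) =====
-- def build_train_and_test_features(
--         df_columns,
--         features_to_process,
--         predict_feature,
--         ignore_features):
--     # Invert the loop: for each wanted name, gather the positions where it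
--     # occurs in df_columns; then sort the gathered positions and read the
--     # columns back in position order.
--     wanted = [n for n in dict.fromkeys(features_to_process)
--               if n != predict_feature and n not in ignore_features]
--     wanted.append(predict_feature)
--     idxs = []
--     for name in wanted:
--         for i, c in enumerate(df_columns):
--             if c == name:
--                 idxs.append(i)
--     idxs.sort()
--     return [df_columns[i] for i in idxs]
-- ===== Notes on version B (the rewrite author's own statement) =====
-- stated objective: alternative
-- what changed: Inverts the traversal: instead of A's per-column branching with inner scans over ignore/features, B builds the deduplicated wanted-name list once, gathers for each wanted name the positions where it occurs in df_columns, sorts the gathered positions, and reads the columns back in position order.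
import Mathlib
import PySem

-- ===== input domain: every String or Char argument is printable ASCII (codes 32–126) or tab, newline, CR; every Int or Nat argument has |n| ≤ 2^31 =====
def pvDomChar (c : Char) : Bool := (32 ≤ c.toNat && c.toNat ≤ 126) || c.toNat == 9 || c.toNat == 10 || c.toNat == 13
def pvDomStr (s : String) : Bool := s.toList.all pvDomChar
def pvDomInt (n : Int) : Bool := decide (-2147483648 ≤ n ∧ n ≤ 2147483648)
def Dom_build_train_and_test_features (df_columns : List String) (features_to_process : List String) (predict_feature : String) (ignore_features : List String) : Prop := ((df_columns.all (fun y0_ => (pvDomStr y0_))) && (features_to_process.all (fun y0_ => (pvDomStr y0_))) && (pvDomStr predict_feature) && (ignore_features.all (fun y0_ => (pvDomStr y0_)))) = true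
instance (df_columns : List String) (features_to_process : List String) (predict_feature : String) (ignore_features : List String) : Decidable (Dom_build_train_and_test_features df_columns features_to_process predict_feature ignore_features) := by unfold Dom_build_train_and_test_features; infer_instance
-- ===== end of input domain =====

-- B inverts A's traversal: it gathers, per wanted name, the positions where that name
-- occurs in df_columns, sorts the gathered positions and reads the columns back by
-- position — an alternative decomposition, not claimed faster.

-- ===== PORT A =====
-- inner 'for i in ignore_features: if i == c: add_feature = False; break'
def pvScanIgnore (ignore_features : List String) (c : String) : Bool :=
  match ignore_features with
  | [] => true
  | i :: rest => if i == c then false else pvScanIgnore rest c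

-- inner 'for f in features_to_process: if f == c: append(c); break'
def pvScanFeatures (features_to_process : List String) (c : String) : List String :=
  match features_to_process with
  | [] => []
  | f :: rest => if f == c then [c] else pvScanFeatures rest c

def build_train_and_test_features (df_columns : List String) (features_to_process : List String) (predict_feature : String) (ignore_features : List String) : List String :=
  df_columns.foldl (fun acc c =>
    if c == predict_feature then acc ++ [c]
    else
      let add_feature := pvScanIgnore ignore_features c
      if add_feature then acc ++ pvScanFeatures features_to_process c
      else acc) []

-- ===== PORT B =====
def build_train_and_test_features_alt (df_columns : List String) (features_to_process : List String) (predict_feature : String) (ignore_features : List String) : List String :=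
  -- wanted = [n for n in dict.fromkeys(features_to_process) if n != predict_feature and n not in ignore_features] + [predict_feature]
  let wanted := ((PySem.List.dedup features_to_process).filter
      (fun n => !(n == predict_feature) && !(ignore_features.contains n))) ++ [predict_feature]
  -- for name in wanted: for i, c in enumerate(df_columns): if c == name: idxs.append(i)
  let idxs := wanted.foldl (fun acc name =>
      (PySem.List.enumerate df_columns 0).foldl
        (fun a ic => if ic.2 == name then a ++ [ic.1] else a) acc) []
  -- idxs.sort(); return [df_columns[i] for i in idxs]
  (PySem.List.sorted idxs (fun i => i) false).map (fun i => PySem.List.pyGetD df_columns i "")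

-- ===== PRECONDITION & SPEC =====
def Spec_build_train_and_test_features (df_columns : List String) (features_to_process : List String) (predict_feature : String) (ignore_features : List String) (out : List String) : Prop := out = build_train_and_test_features_alt df_columns features_to_process predict_feature ignore_features
instance (df_columns : List String) (features_to_process : List String) (predict_feature : String) (ignore_features : List String) (out : List String) : Decidable (Spec_build_train_and_test_features df_columns features_to_process predict_feature ignore_features out) := by unfold Spec_build_train_and_test_features; infer_instance

-- ===== CLAIM (what is proved, stated in full; the proofs are below) =====
def Claim_equal_build_train_and_test_features : Prop := ∀ (df_columns : List String) (features_to_process : List String) (predict_feature : String) (ignore_features : List String), Dom_build_train_and_test_features df_columns features_to_process predict_feature ignore_features → Spec_build_train_and_test_features df_columns features_to_process predict_feature ignore_features (build_train_and_test_features df_columns features_to_process predict_feature ignore_features)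

-- ===== LEMMAS AND PROOFS =====

-- the common kept-column predicate both programs compute
def pvKeep (features_to_process : List String) (predict_feature : String) (ignore_features : List String) (c : String) : Bool :=
  c == predict_feature || (features_to_process.contains c && !(ignore_features.contains c))

theorem pvScanIgnore_eq (ign : List String) (c : String) : pvScanIgnore ign c = !decide (c ∈ ign) := by
  induction ign with
  | nil => rfl
  | cons i rest ih =>
    simp only [pvScanIgnore]
    by_cases h : i = c
    · simp [h]
    · have hb : (i == c) = false := by simpa using h
      have hc : ¬ c = i := fun e => h e.symm
      simp [hb, ih, hc]

theorem pvScanFeatures_eq (fs : List String) (c : String) :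
    pvScanFeatures fs c = if c ∈ fs then [c] else [] := by
  induction fs with
  | nil => rfl
  | cons f rest ih =>
    simp only [pvScanFeatures]
    by_cases h : f = c
    · simp [h]
    · have hb : (f == c) = false := by simpa using h
      have hc : ¬ c = f := fun e => h e.symm
      simp [hb, ih, hc]

-- A is the order-preserving filter by pvKeep
theorem pvA_eq_filter (dfc fs ign : List String) (p : String) (acc : List String) :
    dfc.foldl (fun acc c =>
      if c == p then acc ++ [c]
      else
        let add_feature := pvScanIgnore ign c
        if add_feature then acc ++ pvScanFeatures fs c
        else acc) acc
    = acc ++ dfc.filter (pvKeep fs p ign) := by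
  induction dfc generalizing acc with
  | nil => simp
  | cons c rest ih =>
    rw [List.foldl_cons, List.filter_cons, ih, pvScanIgnore_eq, pvScanFeatures_eq]
    by_cases hp : c = p
    · simp [pvKeep, hp]
    · by_cases hi : c ∈ ign
      · by_cases hf : c ∈ fs <;> simp [pvKeep, hp, hi, hf]
      · by_cases hf : c ∈ fs <;> simp [pvKeep, hp, hi, hf]

-- B's inner gather loop over enumerate collects the positions of one name
theorem pvInner_eq (df : List String) (name : String) (s : Int) (acc : List Int) :
    (PySem.List.enumerate df s).foldl
        (fun a ic => if ic.2 == name then a ++ [ic.1] else a) acc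
    = acc ++ ((List.range df.length).filter (fun k => df.getD k "" == name)).map (fun k : Nat => s + (k : Int)) := by
  induction df generalizing s acc with
  | nil => simp [PySem.List.enumerate_nil]
  | cons a l ih =>
    rw [PySem.List.enumerate_cons, List.foldl_cons, ih]
    have hfc : ((List.range (a :: l).length).filter (fun k => (a :: l).getD k "" == name))
        = (if a == name then [0] else [])
          ++ ((List.range l.length).filter (fun k => l.getD k "" == name)).map (· + 1) := by
      rw [show List.range (a :: l).length = 0 :: (List.range l.length).map (· + 1) from by
        simp [List.range_succ_eq_map]]
      rw [List.filter_cons, List.filter_map]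
      have hc : ((fun k => (a :: l).getD k "" == name) ∘ (· + 1)) = fun k => l.getD k "" == name := by
        funext k; simp
      rw [hc]
      by_cases h : a = name
      · simp [h]
      · have hb : (a == name) = false := by simpa using h
        simp [hb]
    rw [hfc, List.map_append, List.map_map]
    have hm : ((fun k : Nat => s + (k : Int)) ∘ (· + 1)) = fun k : Nat => (s + 1) + (k : Int) := by
      funext k; simp only [Function.comp_apply]; push_cast; ring
    rw [hm]
    by_cases h : a = name
    · simp [h, List.append_assoc]
    · have hb : (a == name) = false := by simpa using h
      simp [hb]

-- positions of one name, as Ints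
def pvPosI (df : List String) (name : String) : List Int :=
  ((List.range df.length).filter (fun k => df.getD k "" == name)).map (fun k : Nat => (k : Int))

theorem pvOuter_eq (df wanted : List String) :
    wanted.foldl (fun acc name =>
      (PySem.List.enumerate df 0).foldl
        (fun a ic => if ic.2 == name then a ++ [ic.1] else a) acc) []
    = wanted.flatMap (pvPosI df) := by
  have hfun : (fun (acc : List Int) (name : String) =>
      (PySem.List.enumerate df 0).foldl
        (fun a ic => if ic.2 == name then a ++ [ic.1] else a) acc)
      = fun acc name => acc ++ pvPosI df name := by
    funext acc name
    rw [pvInner_eq]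
    simp [pvPosI]
  rw [hfun, PySem.List.foldl_append_eq_flatMap]
  simp

-- splitting a filter along two disjoint boolean predicates, up to permutation
theorem pvFilter_or_perm {α : Type} (F : List α) (p q : α → Bool)
    (h : ∀ x ∈ F, ¬(p x = true ∧ q x = true)) :
    (F.filter (fun x => p x || q x)).Perm (F.filter p ++ F.filter q) := by
  induction F with
  | nil => simp
  | cons a F ih =>
    have ha := h a (by simp)
    have ih' := ih (fun x hx => h x (by simp [hx]))
    by_cases hp : p a = true
    · have hq : q a = false := by
        cases hqv : q a
        · rfl
        · exact absurd ⟨hp, hqv⟩ ha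
      simpa [List.filter_cons, hp, hq] using ih'.cons a
    · have hp' : p a = false := by simpa using hp
      by_cases hq : q a = true
      · simp only [List.filter_cons, hp', hq, Bool.false_or]
        exact (ih'.cons a).trans (List.perm_middle.symm)
      · have hq' : q a = false := by simpa using hq
        simpa [List.filter_cons, hp', hq'] using ih'
  
-- gathering per distinct name is a permutation of the single filtered pass
theorem pvFlatMap_perm {α : Type} (F : List α) (g : α → String) (W : List String)
    (hW : W.Nodup) :
    (W.flatMap (fun name => F.filter (fun x => g x == name))).Perm
      (F.filter (fun x => W.contains (g x))) := by
  induction W with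
  | nil => simp
  | cons w ws ih =>
    have hw : w ∉ ws := by simp [List.nodup_cons] at hW; exact hW.1
    have ihp := ih (by simp [List.nodup_cons] at hW; exact hW.2)
    have hsplit : (F.filter (fun x => (w :: ws).contains (g x))).Perm
        (F.filter (fun x => g x == w) ++ F.filter (fun x => ws.contains (g x))) := by
      have : (fun x => (w :: ws).contains (g x)) = fun x => (g x == w) || ws.contains (g x) := by
        funext x; rw [List.contains_cons]
      rw [this]
      apply pvFilter_or_perm
      intro x _ ⟨h1, h2⟩
      have : g x = w := by simpa using h1
      have : w ∈ ws := by
        rw [← this]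
        simpa using h2
      exact hw this
    refine List.Perm.trans ?_ hsplit.symm
    simp only [List.flatMap_cons]
    exact (ihp.append_left _)

-- membership in B's wanted list is exactly pvKeep
theorem pvWanted_mem (fs ign : List String) (p c : String) :
    (((PySem.List.dedup fs).filter
        (fun n => !(n == p) && !(ign.contains n))) ++ [p]).contains c = pvKeep fs p ign c := by
  rw [Bool.eq_iff_iff]
  simp only [List.contains_eq_mem, List.mem_append, List.mem_filter, PySem.List.mem_dedup,
    List.mem_singleton, pvKeep, Bool.or_eq_true, Bool.and_eq_true, Bool.not_eq_true',
    beq_iff_eq, beq_eq_false_iff_ne, ne_eq, decide_eq_true_eq, List.contains_eq_mem,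
    decide_eq_false_iff_not]
  tauto

theorem pvWanted_nodup (fs ign : List String) (p : String) :
    (((PySem.List.dedup fs).filter
        (fun n => !(n == p) && !(ign.contains n))) ++ [p]).Nodup := by
  apply List.Nodup.append
  · exact (PySem.List.nodup_dedup fs).filter _
  · simp
  · intro x hx
    simp only [List.mem_filter, Bool.and_eq_true, Bool.not_eq_true', beq_eq_false_iff_ne, ne_eq] at hx
    simp only [List.mem_singleton]
    exact fun hxp => hx.2.1 hxp

-- the sorted gathered indices are exactly the filtered range, in order
theorem pvTarget_pairwise (df : List String) (q : String → Bool) :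
    (((List.range df.length).filter (fun k => q (df.getD k ""))).map
      (fun k : Nat => (k : Int))).Pairwise (fun a b => a < b) := by
  refine List.Pairwise.map _ (fun a b h => ?_) ((List.pairwise_lt_range).filter _)
  exact_mod_cast h

-- reading the filtered range back through the list is the filter itself
theorem pvReadBack (df : List String) (q : String → Bool) :
    (((List.range df.length).filter (fun k => q (df.getD k ""))).map
      (fun k => df.getD k "")) = df.filter q := by
  induction df with
  | nil => simp
  | cons a l ih =>
    rw [show List.range (a :: l).length = 0 :: (List.range l.length).map (· + 1) from by
      simp [List.range_succ_eq_map]]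
    rw [List.filter_cons, List.filter_map]
    have hc : ((fun k => q ((a :: l).getD k "")) ∘ (· + 1)) = fun k => q (l.getD k "") := by
      funext k; simp
    rw [hc]
    have hg : ((fun k => (a :: l).getD k "") ∘ (· + 1)) = fun k => l.getD k "" := by
      funext k; simp
    by_cases h : q a = true
    · rw [if_pos (by simpa using h), List.map_cons, List.map_map, hg, ih,
        List.getD_cons_zero, List.filter_cons_of_pos h]
    · have h' : q a = false := by simpa using h
      rw [if_neg (by simp [h']), List.map_map, hg, ih, List.filter_cons_of_neg (by simp [h'])]

-- ===== VERDICT (by name: the statement is the Claim_ definition above) =====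
theorem build_train_and_test_features_spec : Claim_equal_build_train_and_test_features := by
  intro df fs p ign _
  unfold Spec_build_train_and_test_features build_train_and_test_features build_train_and_test_features_alt
  dsimp only
  rw [pvA_eq_filter df fs ign p [], List.nil_append]
  set wanted := ((PySem.List.dedup fs).filter
      (fun n => !(n == p) && !(ign.contains n))) ++ [p] with hwdef
  rw [pvOuter_eq]
  -- the gathered indices permute the filtered range
  have hperm : (wanted.flatMap (pvPosI df)).Perm
      (((List.range df.length).filter (fun k => pvKeep fs p ign (df.getD k ""))).map
        (fun k : Nat => (k : Int))) := by
    have h1 : wanted.flatMap (pvPosI df)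
        = (wanted.flatMap (fun name =>
            (List.range df.length).filter (fun k => df.getD k "" == name))).map
          (fun k : Nat => (k : Int)) := by
      rw [List.map_flatMap]
      rfl
    rw [h1]
    apply List.Perm.map
    refine List.Perm.trans (pvFlatMap_perm _ _ _ (pvWanted_nodup fs ign p)) ?_
    apply List.Perm.of_eq
    apply List.filter_congr
    intro k _
    rw [hwdef, pvWanted_mem]
  -- hence sorting them yields exactly the filtered range
  have hsorted : PySem.List.sorted (wanted.flatMap (pvPosI df)) (fun i => i) false
      = ((List.range df.length).filter (fun k => pvKeep fs p ign (df.getD k ""))).map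
        (fun k : Nat => (k : Int)) := by
    exact PySem.List.sorted_eq_of_perm_of_pairwise_lt _ _ _ hperm.symm (pvTarget_pairwise df _)
  rw [hsorted, List.map_map]
  have hread : ((fun i => PySem.List.pyGetD df i "") ∘ (fun k : Nat => (k : Int)))
      = fun k : Nat => df.getD k "" := by
    funext k
    simp [PySem.List.pyGetD_natCast]
  rw [hread, pvReadBack]
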